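-- pv_equiv track=rewrite | github.com/lengyan11001/lobster_online_yingshi | mcp/http_server.py | _reorder_cdn_urls_for_autosave
-- ===== SOURCE A (Python) =====
-- from typing import Any, Dict, List, Optional, Tuple
--
-- def _reorder_cdn_urls_for_autosave(urls: List[str]) -> List[str]:
--     """速推返回里常同时出现 TOS 长期链（…/assets/…）与任务直链（…/v3-tasks/…）。前者可稳定拉取，后者易不可访问；同列表内置后。"""
--     assets: List[str] = []
--     rest: List[str] = []
--     v3tasks: List[str] = []
--     seen: set = set()
--     for u in urls:
--         if u in seen:
--             continue
--         seen.add(u)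
--         lu = u.lower()
--         if "v3-tasks" in lu:
--             v3tasks.append(u)
--         elif "/assets/" in lu:
--             assets.append(u)
--         else:
--             rest.append(u)
--     return assets + rest + v3tasks
-- ===== SOURCE B (Python) =====
-- from typing import List
--
-- def _reorder_cdn_urls_for_autosave(urls: List[str]) -> List[str]:
--     deduped = list(dict.fromkeys(urls))
--     v3tasks = [u for u in deduped if "v3-tasks" in u.lower()]
--     assets = [u for u in deduped if "/assets/" in u.lower() and "v3-tasks" not in u.lower()]
--     rest = [u for u in deduped if "v3-tasks" not in u.lower() and "/assets/" not in u.lower()]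
--     return assets + rest + v3tasks
-- ===== Notes on version B (the rewrite author's own statement) =====
-- stated objective: alternative
-- what changed: Replaces A's single classify-while-dedup loop over four accumulators with a dict.fromkeys dedup step followed by three independent filtering passes over the deduplicated list.
import Mathlib
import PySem

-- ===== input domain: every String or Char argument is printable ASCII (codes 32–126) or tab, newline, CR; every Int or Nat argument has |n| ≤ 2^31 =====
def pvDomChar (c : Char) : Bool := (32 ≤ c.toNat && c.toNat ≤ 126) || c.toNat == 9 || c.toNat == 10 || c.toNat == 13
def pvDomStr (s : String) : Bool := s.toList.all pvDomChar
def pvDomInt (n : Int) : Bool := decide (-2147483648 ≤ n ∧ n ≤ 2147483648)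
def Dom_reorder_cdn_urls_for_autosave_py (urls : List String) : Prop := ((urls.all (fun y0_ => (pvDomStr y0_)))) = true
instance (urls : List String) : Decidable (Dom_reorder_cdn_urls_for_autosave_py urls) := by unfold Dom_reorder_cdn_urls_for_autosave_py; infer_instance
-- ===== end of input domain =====

-- B replaces A's single classify-while-dedup loop with a dedup step followed by three filtering passes (alternative decomposition, same cost).

-- ===== PORT A =====
-- literal transliteration of A: one loop threading (assets, rest, v3tasks, seen)
def reorder_cdn_urls_for_autosave_py (urls : List String) : List String :=
  let st := urls.foldl
    (fun (st : List String × List String × List String × PySem.Set String) u =>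
      let assets := st.1
      let rest := st.2.1
      let v3tasks := st.2.2.1
      let seen := st.2.2.2
      if PySem.Set.contains seen u then st
      else
        let seen := PySem.Set.add seen u
        let lu := PySem.Str.lower u
        if PySem.Str.isIn "v3-tasks" lu then (assets, rest, v3tasks ++ [u], seen)
        else if PySem.Str.isIn "/assets/" lu then (assets ++ [u], rest, v3tasks, seen)
        else (assets, rest ++ [u], v3tasks, seen))
    ([], [], [], PySem.Set.empty)
  st.1 ++ st.2.1 ++ st.2.2.1

-- ===== PORT B =====
-- literal transliteration of B: list(dict.fromkeys(urls)) = PySem.List.dedup, then three filters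
def reorder_cdn_urls_for_autosave_py_alt (urls : List String) : List String :=
  let deduped := PySem.List.dedup urls
  let v3tasks := deduped.filter (fun u => PySem.Str.isIn "v3-tasks" (PySem.Str.lower u))
  let assets := deduped.filter (fun u =>
    PySem.Str.isIn "/assets/" (PySem.Str.lower u) && !PySem.Str.isIn "v3-tasks" (PySem.Str.lower u))
  let rest := deduped.filter (fun u =>
    !PySem.Str.isIn "v3-tasks" (PySem.Str.lower u) && !PySem.Str.isIn "/assets/" (PySem.Str.lower u))
  assets ++ rest ++ v3tasks

-- ===== PRECONDITION & SPEC =====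
def Spec_reorder_cdn_urls_for_autosave_py (urls : List String) (out : List String) : Prop := out = reorder_cdn_urls_for_autosave_py_alt urls
instance (urls : List String) (out : List String) : Decidable (Spec_reorder_cdn_urls_for_autosave_py urls out) := by unfold Spec_reorder_cdn_urls_for_autosave_py; infer_instance

-- ===== CLAIM (what is proved, stated in full; the proofs are below) =====
def Claim_equal_reorder_cdn_urls_for_autosave_py : Prop := ∀ (urls : List String), Dom_reorder_cdn_urls_for_autosave_py urls → Spec_reorder_cdn_urls_for_autosave_py urls (reorder_cdn_urls_for_autosave_py urls)

-- ===== LEMMAS AND PROOFS =====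

-- the elements of urls not yet seen, first occurrences in order, seen threaded through
def pvDedupFrom (s : PySem.Set String) : List String → List String
  | [] => []
  | u :: us => if PySem.Set.contains s u then pvDedupFrom s us
               else u :: pvDedupFrom (PySem.Set.add s u) us

theorem pvUpdate_eq_append_dedupFrom (us : List String) (s : PySem.Set String) :
    PySem.Set.update s us = s ++ pvDedupFrom s us := by
  induction us generalizing s with
  | nil => simp [PySem.Set.update, pvDedupFrom]
  | cons u us ih =>
    show PySem.Set.update (PySem.Set.add s u) us = _
    by_cases hm : u ∈ s
    · have hc : PySem.Set.contains s u = true := by simp [hm]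
      have hadd : PySem.Set.add s u = s := by simp [PySem.Set.add, hm]
      simp [pvDedupFrom, hc, hadd, ih, hm]
    · have hc : PySem.Set.contains s u = false := by simp [hm]
      simp only [pvDedupFrom, hc, Bool.false_eq_true, if_false]
      rw [ih (PySem.Set.add s u)]
      simp [PySem.Set.add, hm]


theorem pvDedup_eq_dedupFrom (urls : List String) :
    PySem.List.dedup urls = pvDedupFrom PySem.Set.empty urls := by
  have h := pvUpdate_eq_append_dedupFrom urls PySem.Set.empty
  simpa [PySem.Set.update, PySem.Set.empty, PySem.Set.ofList] using h

theorem pvFoldA_inv (urls : List String) (a r v : List String) (s : PySem.Set String) :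
    urls.foldl
      (fun (st : List String × List String × List String × PySem.Set String) u =>
        let assets := st.1
        let rest := st.2.1
        let v3tasks := st.2.2.1
        let seen := st.2.2.2
        if PySem.Set.contains seen u then st
        else
          let seen := PySem.Set.add seen u
          let lu := PySem.Str.lower u
          if PySem.Str.isIn "v3-tasks" lu then (assets, rest, v3tasks ++ [u], seen)
          else if PySem.Str.isIn "/assets/" lu then (assets ++ [u], rest, v3tasks, seen)
          else (assets, rest ++ [u], v3tasks, seen))
      (a, r, v, s)
    = (a ++ (pvDedupFrom s urls).filter (fun u =>
          PySem.Str.isIn "/assets/" (PySem.Str.lower u) && !PySem.Str.isIn "v3-tasks" (PySem.Str.lower u)),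
       r ++ (pvDedupFrom s urls).filter (fun u =>
          !PySem.Str.isIn "v3-tasks" (PySem.Str.lower u) && !PySem.Str.isIn "/assets/" (PySem.Str.lower u)),
       v ++ (pvDedupFrom s urls).filter (fun u =>
          PySem.Str.isIn "v3-tasks" (PySem.Str.lower u)),
       PySem.Set.update s urls) := by
  induction urls generalizing a r v s with
  | nil => simp [pvDedupFrom, PySem.Set.update]
  | cons u us ih =>
    simp only [List.foldl_cons]
    by_cases hm : u ∈ s
    · have hc : PySem.Set.contains s u = true := by simp [hm]
      have hadd : PySem.Set.add s u = s := by simp [PySem.Set.add, hm]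
      rw [if_pos hc, ih]
      have hupd : PySem.Set.update s (u :: us) = PySem.Set.update s us := by
        simp [PySem.Set.update, hadd]
      simp [pvDedupFrom, hc, hupd, hm]
    · have hc : PySem.Set.contains s u = false := by simp [hm]
      have hupd : PySem.Set.update s (u :: us) = PySem.Set.update (PySem.Set.add s u) us := by
        simp [PySem.Set.update]
      rw [if_neg (by simp [hm])]
      by_cases hv : PySem.Str.isIn "v3-tasks" (PySem.Str.lower u) = true
      · rw [if_pos hv, ih]
        have hv2 := hv; simp at hv2
        simp [pvDedupFrom, hc, hm, hv2, hupd, List.append_assoc, List.filter_cons]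
      · by_cases ha : PySem.Str.isIn "/assets/" (PySem.Str.lower u) = true
        · rw [if_neg hv, if_pos ha, ih]
          have hv2 : PySem.Str.isIn "v3-tasks" (PySem.Str.lower u) = false := by
            simpa using hv
          have ha2 := ha
          simp at hv2 ha2
          simp [pvDedupFrom, hc, hm, hv2, ha2, hupd, List.append_assoc, List.filter_cons]
        · rw [if_neg hv, if_neg ha, ih]
          have hv2 : PySem.Str.isIn "v3-tasks" (PySem.Str.lower u) = false := by
            simpa using hv
          have ha2 : PySem.Str.isIn "/assets/" (PySem.Str.lower u) = false := by
            simpa using ha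
          simp at hv2 ha2
          simp [pvDedupFrom, hc, hm, hv2, ha2, hupd, List.append_assoc, List.filter_cons]

-- ===== VERDICT (by name: the statement is the Claim_ definition above) =====
theorem reorder_cdn_urls_for_autosave_py_spec : Claim_equal_reorder_cdn_urls_for_autosave_py := by
  intro urls _
  unfold Spec_reorder_cdn_urls_for_autosave_py
  unfold reorder_cdn_urls_for_autosave_py reorder_cdn_urls_for_autosave_py_alt
  rw [pvFoldA_inv, pvDedup_eq_dedupFrom]
  simp
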